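-- pv_equiv track=rewrite | github.com/neuralinterfacinglab/SpeechTargets | detect_speech_shaft.py | get_shaft_indices_SC
-- ===== SOURCE A (Python) =====
-- def get_shaft_indices_SC(channels, elec_map, timeframes=5):
--     """
--     Get name of each shaft and its indices
--
--     Parameters
--     ----------
--     channels: array (electrodes, label)
--         Channel names
--     elec_map: dict(elec label: anatomy label)
--
--     Returns
--     ----------
--     shafts: dict (shaft name, indices)
--         Shaft names with corresponding indices
--     """
--     #multiply for timeframes
--     names = list(channels)*timeframes
--     #get shaft information
--     shafts = {}
--     excluded = []
--     for i, chan in enumerate(names):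
--         anat  = elec_map.get(chan, 'NoValue')
--         if anat == 'NoValue':
--             if chan not in excluded:
--                 excluded.append(chan)
--         elif anat == 'Unknown':
--             if chan not in excluded:
--                 excluded.append(chan)
--         elif 'Left-' in anat or 'Right-' in anat: #This is it
--             if '-White-' not in anat: #Make sure it isn't white matter
--                 if chan.rstrip('0123456789') not in shafts:
--                     shafts[chan.rstrip('0123456789')] = [i]
--                 else:
--                     shafts[chan.rstrip('0123456789')].append(i)
--     return shafts
-- ===== SOURCE B (Python) =====
-- def get_shaft_indices_SC(channels, elec_map, timeframes=5):
--     """Single pass over the base channel list, then expand per-timeframe offsets."""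
--     n = len(channels)
--     base = {}
--     for j, chan in enumerate(channels):
--         anat = elec_map.get(chan, 'NoValue')
--         if anat == 'NoValue' or anat == 'Unknown':
--             continue
--         if ('Left-' in anat or 'Right-' in anat) and '-White-' not in anat:
--             base.setdefault(chan.rstrip('0123456789'), []).append(j)
--     if timeframes <= 0:
--         return {}
--     return {shaft: [t * n + j for t in range(timeframes) for j in idxs]
--             for shaft, idxs in base.items()}
-- ===== Notes on version B (the rewrite author's own statement) =====
-- stated objective: faster
-- what changed: B makes a single pass over the base channels list (instead of iterating the timeframes-multiplied list), builds one dict of base positions, then expands each shaft's indices arithmetically by block offsets t*len(channels)+j, and drops A's dead `excluded` list whose linear membership scans A repeats for every element of the multiplied list.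
import Mathlib
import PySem

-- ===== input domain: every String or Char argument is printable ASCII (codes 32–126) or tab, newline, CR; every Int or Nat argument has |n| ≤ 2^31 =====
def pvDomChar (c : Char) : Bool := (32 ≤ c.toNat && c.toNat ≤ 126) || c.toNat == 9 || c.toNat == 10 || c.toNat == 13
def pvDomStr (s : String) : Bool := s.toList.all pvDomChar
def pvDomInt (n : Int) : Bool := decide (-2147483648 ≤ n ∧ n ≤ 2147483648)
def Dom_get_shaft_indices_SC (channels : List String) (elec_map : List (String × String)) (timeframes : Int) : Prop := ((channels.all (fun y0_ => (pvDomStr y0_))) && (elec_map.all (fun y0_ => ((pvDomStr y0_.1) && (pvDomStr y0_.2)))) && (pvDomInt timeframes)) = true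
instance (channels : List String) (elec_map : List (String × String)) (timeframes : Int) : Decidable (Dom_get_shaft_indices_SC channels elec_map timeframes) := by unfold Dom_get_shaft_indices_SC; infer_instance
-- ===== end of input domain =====

-- B replaces A's pass over the timeframes-multiplied channel list by one pass over the base
-- channels plus arithmetic offset expansion, dropping A's dead `excluded` list and its repeated linear scans (objective: faster, measured).

-- ===== PORT A =====
-- shared primitive helpers: elec_map.get(chan, 'NoValue') (dict lookup = first match in the
-- association list) and chan.rstrip('0123456789') (drop trailing characters from that set;
-- hand-ported, exact: PySem has no rstrip-with-chars)
def pvAnat (elec_map : List (String × String)) (chan : String) : String :=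
  (((elec_map.find? (fun p => p.1 == chan)).map (fun p => p.2)).getD "NoValue")
def pvShaft (chan : String) : String :=
  String.ofList ((chan.toList.reverse.dropWhile (fun c => ("0123456789".toList).contains c)).reverse)
def get_shaft_indices_SC (channels : List String) (elec_map : List (String × String)) (timeframes : Int) : List (String × List Int) :=
  let names : List String := (List.range timeframes.toNat).flatMap (fun _ => channels)
  let st :=
    (PySem.List.enumerate names 0).foldl
      (fun (st : PySem.Dict String (List Int) × List String) p =>
        let anat := pvAnat elec_map p.2
        if anat == "NoValue" then
          (st.1, if st.2.contains p.2 then st.2 else st.2 ++ [p.2])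
        else if anat == "Unknown" then
          (st.1, if st.2.contains p.2 then st.2 else st.2 ++ [p.2])
        else if PySem.Str.isIn "Left-" anat || PySem.Str.isIn "Right-" anat then
          (if PySem.Str.isIn "-White-" anat = false then
            (if st.1.contains (pvShaft p.2) = false then st.1.insert (pvShaft p.2) [p.1]
             else st.1.modify (pvShaft p.2) [] (fun l => l ++ [p.1]))
           else st.1, st.2)
        else (st.1, st.2))
      ((PySem.Dict.empty : PySem.Dict String (List Int)), ([] : List String))
  st.1.items

-- ===== PORT B =====
def get_shaft_indices_SC_alt (channels : List String) (elec_map : List (String × String)) (timeframes : Int) : List (String × List Int) :=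
  let n : Int := (channels.length : Int)
  let base :=
    (PySem.List.enumerate channels 0).foldl
      (fun (d : PySem.Dict String (List Int)) p =>
        let anat := pvAnat elec_map p.2
        if anat == "NoValue" || anat == "Unknown" then d
        else if (PySem.Str.isIn "Left-" anat || PySem.Str.isIn "Right-" anat)
                  && !(PySem.Str.isIn "-White-" anat) then
          d.modify (pvShaft p.2) [] (fun l => l ++ [p.1])
        else d)
      (PySem.Dict.empty : PySem.Dict String (List Int))
  if timeframes ≤ 0 then []
  else base.items.map
    (fun q => (q.1, (PySem.List.pyRange 0 timeframes 1).flatMap (fun t => q.2.map (fun j => t * n + j))))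

-- ===== PRECONDITION & SPEC =====
def Spec_get_shaft_indices_SC (channels : List String) (elec_map : List (String × String)) (timeframes : Int) (out : List (String × List Int)) : Prop := out = get_shaft_indices_SC_alt channels elec_map timeframes
instance (channels : List String) (elec_map : List (String × String)) (timeframes : Int) (out : List (String × List Int)) : Decidable (Spec_get_shaft_indices_SC channels elec_map timeframes out) := by unfold Spec_get_shaft_indices_SC; infer_instance

-- ===== CLAIM (what is proved, stated in full; the proofs are below) =====
def Claim_equal_get_shaft_indices_SC : Prop := ∀ (channels : List String) (elec_map : List (String × String)) (timeframes : Int), Dom_get_shaft_indices_SC channels elec_map timeframes → Spec_get_shaft_indices_SC channels elec_map timeframes (get_shaft_indices_SC channels elec_map timeframes)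

-- ===== LEMMAS AND PROOFS =====

def pvValid (elec_map : List (String × String)) (chan : String) : Bool :=
  let anat := pvAnat elec_map chan
  !(anat == "NoValue") && !(anat == "Unknown")
    && (PySem.Str.isIn "Left-" anat || PySem.Str.isIn "Right-" anat)
    && !(PySem.Str.isIn "-White-" anat)
def pvStep (elec_map : List (String × String)) (d : PySem.Dict String (List Int)) (p : Int × String) : PySem.Dict String (List Int) :=
  if pvValid elec_map p.2 then d.modify (pvShaft p.2) [] (fun l => l ++ [p.1]) else d
def pvExcl (elec_map : List (String × String)) (e : List String) (p : Int × String) : List String :=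
  let anat := pvAnat elec_map p.2
  if anat == "NoValue" || anat == "Unknown" then
    (if e.contains p.2 then e else e ++ [p.2]) else e

theorem getD_of_not_contains (d : PySem.Dict String (List Int)) (k : String)
    (h : d.contains k = false) : d.getD k ([] : List Int) = [] := by
  have := (PySem.Dict.get?_eq_none_iff_contains d k).mpr h
  simp [PySem.Dict.getD, this]

theorem getD_pvStep_fold (em : List (String × String)) (ps : List (Int × String))
    (d : PySem.Dict String (List Int)) (k : String) :
    (ps.foldl (pvStep em) d).getD k []
      = d.getD k [] ++ (ps.filter (fun p => pvValid em p.2 && (pvShaft p.2 == k))).map (fun p => p.1) := by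
  induction ps generalizing d with
  | nil => simp
  | cons p ps ih =>
    simp only [List.foldl_cons, List.filter_cons]
    by_cases hv : pvValid em p.2 = true
    · by_cases hk : pvShaft p.2 = k
      · subst hk
        simp [pvStep, hv, ih]
      · have hbk : (pvShaft p.2 == k) = false := by simp [hk]
        simp only [pvStep, hv, if_pos, hbk, Bool.and_false, Bool.false_eq_true, if_false]
        rw [ih, PySem.Dict.getD_modify, if_neg (fun h => hk h.symm)]
    · simp only [Bool.not_eq_true] at hv
      simp [pvStep, hv, ih]

theorem keys_modify_add (d : PySem.Dict String (List Int)) (k : String) (f : List Int → List Int) :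
    (d.modify k [] f).keys = PySem.Set.add d.keys k := by
  rw [PySem.Dict.keys_modify]
  cases hc : d.contains k with
  | true =>
    rw [PySem.Dict.keys_insert_of_contains _ _ hc]
    simp [PySem.Set.add, (PySem.Dict.contains_iff_mem_keys d k).mp hc]
  | false =>
    rw [PySem.Dict.keys_insert_of_not_contains _ _ hc]
    have hm : k ∉ d.keys := fun hm => by
      simp [(PySem.Dict.contains_iff_mem_keys d k).mpr hm] at hc
    simp [PySem.Set.add, hm]

theorem keys_pvStep_fold (em : List (String × String)) (ps : List (Int × String))
    (d : PySem.Dict String (List Int)) :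
    (ps.foldl (pvStep em) d).keys
      = PySem.Set.update d.keys ((ps.filter (fun p => pvValid em p.2)).map (fun p => pvShaft p.2)) := by
  induction ps generalizing d with
  | nil => simp [PySem.Set.update]
  | cons p ps ih =>
    simp only [List.foldl_cons, List.filter_cons]
    by_cases hv : pvValid em p.2 = true
    · simp only [hv, if_pos]
      rw [ih]
      simp only [List.map_cons]
      have : PySem.Set.update d.keys (pvShaft p.2 :: (ps.filter (fun p => pvValid em p.2)).map (fun p => pvShaft p.2))
          = PySem.Set.update (PySem.Set.add d.keys (pvShaft p.2)) ((ps.filter (fun p => pvValid em p.2)).map (fun p => pvShaft p.2)) := rfl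
      rw [this, ← keys_modify_add d (pvShaft p.2) (fun l => l ++ [p.1])]
      simp [pvStep, hv]
    · simp only [Bool.not_eq_true] at hv
      simp [pvStep, hv, ih]

theorem nodup_keys_pvStep_fold (em : List (String × String)) (ps : List (Int × String))
    (d : PySem.Dict String (List Int)) (h : d.keys.Nodup) :
    (ps.foldl (pvStep em) d).keys.Nodup := by
  rw [keys_pvStep_fold]
  exact PySem.Set.nodup_update _ _ h

theorem items_eq_keys_map (d : PySem.Dict String (List Int)) (h : d.keys.Nodup) :
    d.items = d.keys.map (fun k => (k, d.getD k [])) := by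
  obtain ⟨l⟩ := d
  induction l with
  | nil => rfl
  | cons q l ihl =>
    obtain ⟨k, v⟩ := q
    have h' : k ∉ l.map (fun p => p.1) ∧ (l.map (fun p => p.1)).Nodup := by
      simpa [PySem.Dict.keys] using h
    have hhead : (PySem.Dict.mk ((k, v) :: l)).getD k ([] : List Int) = v := by
      simp [PySem.Dict.getD, PySem.Dict.get?_mk_cons]
    have htail : (l.map (fun p => p.1)).map (fun x => (x, (PySem.Dict.mk ((k, v) :: l)).getD x ([] : List Int)))
        = (l.map (fun p => p.1)).map (fun x => (x, (PySem.Dict.mk l).getD x ([] : List Int))) := by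
      apply List.map_congr_left
      intro x hx
      have hxk : (k == x) = false := by
        have : k ≠ x := fun hkx => h'.1 (hkx ▸ hx)
        simp [this]
      simp [PySem.Dict.getD, PySem.Dict.get?_mk_cons, hxk]
    show (k, v) :: l
      = (k, (PySem.Dict.mk ((k, v) :: l)).getD k []) ::
        (l.map (fun p => p.1)).map (fun x => (x, (PySem.Dict.mk ((k, v) :: l)).getD x []))
    rw [hhead, htail]
    exact congrArg (List.cons (k, v)) (ihl h'.2)

-- index lists of a filtered enumeration shift with the start
theorem filter_enum_shift (em : List (String × String)) (k : String) (c : List String) :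
    ∀ (a s : Int),
      (((PySem.List.enumerate c s).filter (fun p => pvValid em p.2 && (pvShaft p.2 == k))).map (fun p => p.1)).map (fun i => a + i)
      = ((PySem.List.enumerate c (a + s)).filter (fun p => pvValid em p.2 && (pvShaft p.2 == k))).map (fun p => p.1) := by
  induction c with
  | nil => intro a s; simp [PySem.List.enumerate_nil]
  | cons x c ih =>
    intro a s
    simp only [PySem.List.enumerate_cons, List.filter_cons]
    by_cases hx : (pvValid em x && (pvShaft x == k)) = true
    · simp only [hx, if_pos]
      simp only [List.map_cons]
      rw [ih a (s + 1), show a + (s + 1) = a + s + 1 from by ring]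
    · simp only [Bool.not_eq_true] at hx
      simp only [hx, Bool.false_eq_true, if_false]
      rw [ih a (s + 1), show a + (s + 1) = a + s + 1 from by ring]

-- the shaft names produced by a block do not depend on the start index
theorem keys_enum_shift (em : List (String × String)) (c : List String) :
    ∀ (s : Int),
      ((PySem.List.enumerate c s).filter (fun p => pvValid em p.2)).map (fun p => pvShaft p.2)
      = (c.filter (pvValid em)).map pvShaft := by
  induction c with
  | nil => intro s; simp [PySem.List.enumerate_nil]
  | cons x c ih =>
    intro s
    simp only [PySem.List.enumerate_cons, List.filter_cons]
    by_cases hx : pvValid em x = true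
    · simp [hx, ih (s + 1)]
    · simp only [Bool.not_eq_true] at hx
      simp [hx, ih (s + 1)]

theorem enum_flat (c : List String) (m : Nat) :
    PySem.List.enumerate ((List.range m).flatMap (fun _ => c)) 0
      = (List.range m).flatMap (fun (r : Nat) => PySem.List.enumerate c ((r : Int) * (c.length : Int))) := by
  induction m with
  | zero => simp [PySem.List.enumerate_nil]
  | succ m ih =>
    rw [List.range_succ]
    simp only [List.flatMap_append, List.flatMap_cons, List.flatMap_nil, List.append_nil]
    rw [PySem.List.enumerate_append, ih]
    simp [List.length_flatMap]

theorem filter_map_flatMap {α β γ : Type} (l : List α) (f : α → List β) (p : β → Bool) (g : β → γ) :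
    ((l.flatMap f).filter p).map g = l.flatMap (fun x => ((f x).filter p).map g) := by
  induction l with
  | nil => rfl
  | cons x l ih => simp [List.flatMap_cons, List.filter_append, ih]

theorem flatMap_map' {α β γ : Type} (l : List α) (f : α → β) (g : β → List γ) :
    (l.map f).flatMap g = l.flatMap (fun x => g (f x)) := by
  induction l with
  | nil => rfl
  | cons x l ih => simp [List.flatMap_cons, ih]

theorem update_of_subset (s : PySem.Set String) (l : List String) (h : ∀ x ∈ l, x ∈ s) :
    PySem.Set.update s l = s := by
  induction l generalizing s with
  | nil => rfl
  | cons x l ih =>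
    have hx : PySem.Set.add s x = s := by simp [PySem.Set.add, h x (by simp)]
    simp only [PySem.Set.update, List.foldl_cons]
    rw [show List.foldl PySem.Set.add (PySem.Set.add s x) l = PySem.Set.update (PySem.Set.add s x) l from rfl, hx]
    exact ih s (fun y hy => h y (by simp [hy]))

theorem update_append (s : PySem.Set String) (l1 l2 : List String) :
    PySem.Set.update s (l1 ++ l2) = PySem.Set.update (PySem.Set.update s l1) l2 := by
  simp [PySem.Set.update, List.foldl_append]

theorem update_rep (K : List String) (m : Nat) (hm : 1 ≤ m) :
    PySem.Set.update [] ((List.range m).flatMap (fun _ => K)) = PySem.Set.update [] K := by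
  induction m with
  | zero => omega
  | succ m ih =>
    rcases Nat.eq_or_lt_of_le hm with h1 | h1
    · simp [← h1]
    · have hm' : 1 ≤ m := by omega
      rw [List.range_succ]
      simp only [List.flatMap_append, List.flatMap_cons, List.flatMap_nil, List.append_nil]
      rw [update_append, ih hm']
      exact update_of_subset _ _ (fun x hx => (PySem.Set.mem_update _ _ _).mpr (Or.inr hx))

-- A's dict value at k over the repeated list is B's base value expanded by block offsets
theorem value_eq (em : List (String × String)) (c : List String) (t : Int) (k : String) :
    ((PySem.List.enumerate ((List.range t.toNat).flatMap (fun _ => c)) 0).foldl (pvStep em) PySem.Dict.empty).getD k []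
    = (PySem.List.pyRange 0 t 1).flatMap (fun r =>
        (((PySem.List.enumerate c 0).foldl (pvStep em) PySem.Dict.empty).getD k []).map (fun j => r * (c.length : Int) + j)) := by
  rw [enum_flat, getD_pvStep_fold]
  conv_rhs => rw [getD_pvStep_fold]
  rw [show (PySem.Dict.empty : PySem.Dict String (List Int)).getD k [] = [] from rfl]
  simp only [List.nil_append]
  rw [filter_map_flatMap, PySem.List.pyRange_one, sub_zero, flatMap_map']
  apply List.flatMap_congr
  intro r _
  have := filter_enum_shift em k c ((r : Int) * (c.length : Int)) 0
  rw [add_zero] at this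
  rw [← this]
  simp [zero_add]

-- A's key list over the repeated channel list equals B's base key list
theorem keys_eq (em : List (String × String)) (c : List String) (t : Int) (ht : 0 < t) :
    ((PySem.List.enumerate ((List.range t.toNat).flatMap (fun _ => c)) 0).foldl (pvStep em) PySem.Dict.empty).keys
    = ((PySem.List.enumerate c 0).foldl (pvStep em) PySem.Dict.empty).keys := by
  rw [enum_flat, keys_pvStep_fold, keys_pvStep_fold]
  have hblocks : ((List.range t.toNat).flatMap (fun (r : Nat) => PySem.List.enumerate c ((r : Int) * (c.length : Int)))).filter (fun p => pvValid em p.2)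
      = (List.range t.toNat).flatMap (fun (r : Nat) => (PySem.List.enumerate c ((r : Int) * (c.length : Int))).filter (fun p => pvValid em p.2)) :=
    List.filter_flatMap
  rw [hblocks, List.map_flatMap]
  have hK : ∀ (r : Nat), ((PySem.List.enumerate c ((r : Int) * (c.length : Int))).filter (fun p => pvValid em p.2)).map (fun p => pvShaft p.2)
      = (c.filter (pvValid em)).map pvShaft := fun r => keys_enum_shift em c _
  have : ((List.range t.toNat).flatMap fun (r : Nat) => ((PySem.List.enumerate c ((r : Int) * (c.length : Int))).filter (fun p => pvValid em p.2)).map (fun p => pvShaft p.2))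
      = (List.range t.toNat).flatMap (fun _ => (c.filter (pvValid em)).map pvShaft) :=
    List.flatMap_congr (fun r _ => hK r)
  rw [this]
  have hm : 1 ≤ t.toNat := by omega
  rw [show (PySem.Dict.empty : PySem.Dict String (List Int)).keys = [] from rfl]
  rw [update_rep _ _ hm, keys_enum_shift em c 0]

theorem stepB_eq (em : List (String × String)) :
    (fun (d : PySem.Dict String (List Int)) (p : Int × String) =>
        let anat := pvAnat em p.2
        if anat == "NoValue" || anat == "Unknown" then d
        else if (PySem.Str.isIn "Left-" anat || PySem.Str.isIn "Right-" anat)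
                  && !(PySem.Str.isIn "-White-" anat) then
          d.modify (pvShaft p.2) [] (fun l => l ++ [p.1])
        else d)
    = pvStep em := by
  funext d p
  simp only [pvStep, pvValid]
  split_ifs <;> first | rfl | simp_all

theorem stepA_eq (em : List (String × String)) :
    (fun (st : PySem.Dict String (List Int) × List String) (p : Int × String) =>
        let anat := pvAnat em p.2
        if anat == "NoValue" then
          (st.1, if st.2.contains p.2 then st.2 else st.2 ++ [p.2])
        else if anat == "Unknown" then
          (st.1, if st.2.contains p.2 then st.2 else st.2 ++ [p.2])
        else if PySem.Str.isIn "Left-" anat || PySem.Str.isIn "Right-" anat then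
          (if PySem.Str.isIn "-White-" anat = false then
            (if st.1.contains (pvShaft p.2) = false then st.1.insert (pvShaft p.2) [p.1]
             else st.1.modify (pvShaft p.2) [] (fun l => l ++ [p.1]))
           else st.1, st.2)
        else (st.1, st.2))
    = (fun st p => (pvStep em st.1 p, pvExcl em st.2 p)) := by
  funext st p
  obtain ⟨d, e⟩ := st
  simp only [pvStep, pvValid, pvExcl]
  split_ifs <;> first | rfl | (simp_all [PySem.Dict.modify, getD_of_not_contains])

theorem main_eq (channels : List String) (elec_map : List (String × String)) (timeframes : Int) :
    get_shaft_indices_SC channels elec_map timeframes = get_shaft_indices_SC_alt channels elec_map timeframes := by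
  simp only [get_shaft_indices_SC, get_shaft_indices_SC_alt]
  rw [stepA_eq elec_map, PySem.List.foldl_prod_mk, stepB_eq elec_map]
  by_cases ht : timeframes ≤ 0
  · rw [if_pos ht]
    rw [show timeframes.toNat = 0 from Int.toNat_of_nonpos ht]
    rfl
  · rw [if_neg ht]
    have ht' : 0 < timeframes := by omega
    have hA := nodup_keys_pvStep_fold elec_map
      (PySem.List.enumerate ((List.range timeframes.toNat).flatMap (fun _ => channels)) 0)
      PySem.Dict.empty (by simp [PySem.Dict.empty, PySem.Dict.keys])
    have hB := nodup_keys_pvStep_fold elec_map (PySem.List.enumerate channels 0)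
      PySem.Dict.empty (by simp [PySem.Dict.empty, PySem.Dict.keys])
    rw [items_eq_keys_map _ hA, items_eq_keys_map _ hB, List.map_map]
    rw [keys_eq elec_map channels timeframes ht']
    apply List.map_congr_left
    intro k _
    simp only [Function.comp]
    rw [value_eq elec_map channels timeframes k]

-- ===== VERDICT (by name: the statement is the Claim_ definition above) =====
theorem get_shaft_indices_SC_spec : Claim_equal_get_shaft_indices_SC := by
  intro channels elec_map timeframes _
  show get_shaft_indices_SC channels elec_map timeframes = get_shaft_indices_SC_alt channels elec_map timeframes
  exact main_eq channels elec_map timeframes
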